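-- pv_equiv track=rewrite | github.com/dasraev/LEETCODE | 2562. Find the Array Concatenation Value.py | findTheArrayConcVal
-- ===== SOURCE A (Python) =====
-- def findTheArrayConcVal(nums) -> int:
--     s=0
--     while len(nums)>0:
--         if len(nums)>=2:
--             s+=int(str(nums[0])+str(nums[-1]))
--             nums.pop(0)
--             nums.pop(-1)
--         else:
--             s += int(str(nums[0]))
--             nums.pop(0)
--
--     return s
-- ===== SOURCE B (Python) =====
-- def findTheArrayConcVal(nums) -> int:
--     s = 0
--     i, j = 0, len(nums) - 1
--     while i < j:
--         s += int(str(nums[i]) + str(nums[j]))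
--         i += 1
--         j -= 1
--     if i == j:
--         s += int(str(nums[i]))
--     return s
-- ===== Notes on version B (the rewrite author's own statement) =====
-- stated objective: faster
-- what changed: Replaces A's destructive loop that pops both ends of the list (each pop(0) shifts the whole remaining list) with a non-mutating two-pointer index scan from both ends.
import Mathlib
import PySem

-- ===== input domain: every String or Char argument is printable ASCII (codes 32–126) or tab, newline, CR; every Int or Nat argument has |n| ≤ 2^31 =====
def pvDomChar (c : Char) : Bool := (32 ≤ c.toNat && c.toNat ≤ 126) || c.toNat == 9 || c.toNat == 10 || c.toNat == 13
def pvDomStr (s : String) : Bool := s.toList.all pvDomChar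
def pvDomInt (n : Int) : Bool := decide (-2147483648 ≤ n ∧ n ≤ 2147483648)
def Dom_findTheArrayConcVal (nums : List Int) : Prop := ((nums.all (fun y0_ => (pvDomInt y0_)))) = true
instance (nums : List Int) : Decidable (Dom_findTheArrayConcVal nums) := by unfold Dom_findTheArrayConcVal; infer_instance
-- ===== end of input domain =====

-- B replaces A's destructive pop-both-ends loop with a non-mutating two-pointer scan
-- (equivalence is about the return value: Python A empties its argument list, B does not mutate it).


-- ===== PORT A =====
-- int(str(a) + str(b)); none (Python: ValueError, when b < 0) is taken as 0 — Pre_ excludes those inputs.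
-- int(str(a)) (pvCat1) never raises; total form for uniformity with pvCat2.
-- Both loops carry a structural fuel guard (fuel ≥ number of iterations) that only makes them total.
def pvCat2 (a b : Int) : Int :=
  (PySem.Int.ofChars? (PySem.Int.toChars a ++ PySem.Int.toChars b)).getD 0
def pvCat1 (a : Int) : Int :=
  (PySem.Int.ofChars? (PySem.Int.toChars a)).getD 0

def pvGoA : Nat → List Int → Int → Int
  | _, [], s => s
  | _, [x], s => s + pvCat1 x
  | 0, _ :: _ :: _, s => s
  | fuel + 1, x :: y :: t, s =>
      pvGoA fuel ((y :: t).dropLast) (s + pvCat2 x ((y :: t).getLast (by simp)))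

def findTheArrayConcVal (nums : List Int) : Int := pvGoA nums.length nums 0

-- ===== PORT B =====
-- B reads nums[k] at an in-range nonnegative index (default never reached under the loop bounds).
def pvGet (nums : List Int) (k : Int) : Int := (PySem.List.pyGet? nums k).getD 0

def pvGoB : Nat → List Int → Int → Int → Int → Int
  | 0, _, _, _, s => s
  | fuel + 1, nums, i, j, s =>
      if i < j then
        pvGoB fuel nums (i + 1) (j - 1) (s + pvCat2 (pvGet nums i) (pvGet nums j))
      else if i = j then s + pvCat1 (pvGet nums i)
      else s

def findTheArrayConcVal_alt (nums : List Int) : Int :=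
  pvGoB (nums.length + 1) nums 0 ((nums.length : Int) - 1) 0


-- ===== PRECONDITION & SPEC =====
-- Pre_ excludes exactly the inputs on which Python A raises ValueError: whenever a popped last
-- element (an element of the back half) is negative, int(str(first)+str(last)) sees "…-…".
def Pre_findTheArrayConcVal (nums : List Int) : Prop :=
  ∀ x ∈ nums.drop ((nums.length + 1) / 2), 0 ≤ x
instance (nums : List Int) : Decidable (Pre_findTheArrayConcVal nums) := by
  unfold Pre_findTheArrayConcVal; infer_instance

def pvWitness_findTheArrayConcVal : List Int := [12, 3, 45]

def Spec_findTheArrayConcVal (nums : List Int) (out : Int) : Prop := out = findTheArrayConcVal_alt nums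
instance (nums : List Int) (out : Int) : Decidable (Spec_findTheArrayConcVal nums out) := by unfold Spec_findTheArrayConcVal; infer_instance

-- ===== CLAIM (what is proved, stated in full; the proofs are below) =====
def Claim_equal_findTheArrayConcVal : Prop := ∀ (nums : List Int), Dom_findTheArrayConcVal nums → Pre_findTheArrayConcVal nums → Spec_findTheArrayConcVal nums (findTheArrayConcVal nums)

-- ===== LEMMAS AND PROOFS =====

-- Reading an in-range nonnegative index one step into x :: l ++ [z] reads l.
lemma pvGet_shift (x z : Int) (l : List Int) (k : Int) (hk : 0 ≤ k) (hk2 : k < l.length) :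
    pvGet (x :: (l ++ [z])) (k + 1) = pvGet l k := by
  unfold pvGet
  rw [PySem.List.pyGet?_of_nonneg _ (by omega : (0:Int) ≤ k + 1),
      PySem.List.pyGet?_of_nonneg _ hk]
  have h1 : (k + 1).toNat = k.toNat + 1 := by omega
  rw [h1]
  rw [List.getElem?_cons_succ, List.getElem?_append_left (by omega : k.toNat < l.length)]

lemma pvGet_zero (a : Int) (r : List Int) : pvGet (a :: r) 0 = a := by
  simp [pvGet]

lemma pvGet_last (x z : Int) (m : List Int) :
    pvGet (x :: (m ++ [z])) ((m.length : Int) + 1) = z := by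
  unfold pvGet
  rw [PySem.List.pyGet?_of_nonneg _ (by omega : (0:Int) ≤ (m.length : Int) + 1)]
  have h1 : ((m.length : Int) + 1).toNat = m.length + 1 := by omega
  rw [h1, List.getElem?_cons_succ, List.getElem?_concat_length]
  rfl

lemma pvGoB_shift (fuel : Nat) (x z : Int) (l : List Int) (i j s : Int)
    (hi : 0 ≤ i) (hj : j < l.length) :
    pvGoB fuel (x :: (l ++ [z])) (i + 1) (j + 1) s = pvGoB fuel l i j s := by
  induction fuel generalizing i j s with
  | zero => rfl
  | succ fuel ih =>
    by_cases h : i < j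
    · conv_lhs => rw [pvGoB]
      conv_rhs => rw [pvGoB]
      rw [if_pos (by omega : i + 1 < j + 1), if_pos h,
          pvGet_shift x z l i hi (by omega), pvGet_shift x z l j (by omega) hj]
      have e : j + 1 - 1 = (j - 1) + 1 := by ring
      rw [e]
      exact ih (i + 1) (j - 1) _ (by omega) (by omega)
    · by_cases h2 : i = j
      · subst h2
        conv_lhs => rw [pvGoB]
        conv_rhs => rw [pvGoB]
        rw [if_neg (by omega : ¬ (i + 1 < i + 1)), if_pos rfl, if_neg h, if_pos rfl,
            pvGet_shift x z l i hi (by omega)]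
      · conv_lhs => rw [pvGoB]
        conv_rhs => rw [pvGoB]
        rw [if_neg (by omega : ¬ (i + 1 < j + 1)), if_neg (by omega : ¬ (i + 1 = j + 1)),
            if_neg h, if_neg h2]

lemma pvGoA_eq_pvGoB (fa fb : Nat) (l : List Int) (s : Int)
    (ha : l.length ≤ fa) (hb : l.length ≤ fb) :
    pvGoA fa l s = pvGoB (fb + 1) l 0 ((l.length : Int) - 1) s := by
  match l with
  | [] =>
    cases fa <;> · rw [pvGoA, pvGoB]; norm_num
  | [x] =>
    cases fa <;> · rw [pvGoA, pvGoB]; norm_num [pvGet_zero]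
  | x :: y :: t =>
    obtain ⟨fa', rfl⟩ : ∃ fa', fa = fa' + 1 := ⟨fa - 1, by simp at ha; omega⟩
    obtain ⟨fb', rfl⟩ : ∃ fb', fb = fb' + 1 := ⟨fb - 1, by simp at hb; omega⟩
    have ha' : t.length ≤ fa' := by simp at ha; omega
    have hb' : t.length ≤ fb' := by simp at hb; omega
    have hne : (y :: t) ≠ [] := by simp
    have hd : x :: y :: t = x :: ((y :: t).dropLast ++ [(y :: t).getLast hne]) := by
      rw [List.dropLast_append_getLast hne]
    have hm : (y :: t).dropLast.length = t.length := by simp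
    rw [pvGoA]
    rw [pvGoB]
    have hlen : ((x :: y :: t).length : Int) - 1 = (t.length : Int) + 1 := by
      simp
    rw [if_pos (by rw [hlen]; omega : (0:Int) < ((x :: y :: t).length : Int) - 1)]
    rw [hlen]
    conv_rhs => rw [hd]
    rw [pvGet_zero]
    rw [show ((t.length : Int) + 1) = ((y :: t).dropLast.length : Int) + 1 by rw [hm]]
    rw [pvGet_last]
    rw [show ((y :: t).dropLast.length : Int) + 1 - 1 = (((y :: t).dropLast.length : Int) - 1) + 1 by ring]
    rw [pvGoB_shift (fb' + 1) x ((y :: t).getLast hne) ((y :: t).dropLast) 0 _ _ le_rfl (by omega)]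
    exact pvGoA_eq_pvGoB fa' fb' ((y :: t).dropLast) _ (by omega) (by omega)


-- ===== VERDICT (by name: the statement is the Claim_ definition above) =====
theorem findTheArrayConcVal_spec : Claim_equal_findTheArrayConcVal := by
  intro nums _ _
  unfold Spec_findTheArrayConcVal findTheArrayConcVal findTheArrayConcVal_alt
  exact pvGoA_eq_pvGoB nums.length nums.length nums 0 le_rfl le_rfl
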